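-- pv_equiv track=rewrite | github.com/junsoopooh/Studying_Algorithm | week01/yeongseo/3.py | solution
-- ===== SOURCE A (Python) =====
-- def solution(s):
--     stack = []
--
--     for ch in s:
--         if len(stack) != 0 and stack[-1] == ch:
--             stack.pop()
--
--         else:
--             stack.append(ch)
--
--     return 1 if len(stack) == 0 else 0
-- ===== SOURCE B (Python) =====
-- def solution(s):
--     t = list(s)
--     while True:
--         for i in range(len(t) - 1):
--             if t[i] == t[i + 1]:
--                 del t[i:i + 2]
--                 break
--         else:
--             break
--     return 1 if not t else 0
-- ===== Notes on version B (the rewrite author's own statement) =====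
-- stated objective: alternative
-- what changed: Replaced the single-pass stack reduction with a fixpoint loop that repeatedly finds the first adjacent equal pair and deletes it until none remains, then tests emptiness.
import Mathlib
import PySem

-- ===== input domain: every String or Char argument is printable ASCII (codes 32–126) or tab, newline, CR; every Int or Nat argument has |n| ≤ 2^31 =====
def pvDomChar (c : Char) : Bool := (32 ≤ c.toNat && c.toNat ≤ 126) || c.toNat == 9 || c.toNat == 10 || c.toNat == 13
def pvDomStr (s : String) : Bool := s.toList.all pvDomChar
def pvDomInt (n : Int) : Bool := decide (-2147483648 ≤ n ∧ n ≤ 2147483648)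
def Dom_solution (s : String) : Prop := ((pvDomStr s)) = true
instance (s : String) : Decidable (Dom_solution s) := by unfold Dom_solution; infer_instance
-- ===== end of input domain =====

-- B replaces A's one-pass stack with a fixpoint loop deleting the first adjacent equal
-- pair until none remains (alternative decomposition; not claimed faster).

-- ===== PORT A =====
-- the loop body: pop when the stack top equals the incoming char, else append
def solStep (st : List Char) (ch : Char) : List Char :=
  if st.length ≠ 0 ∧ st.getLast? = some ch then st.dropLast else st ++ [ch]

def solution (s : String) : Int :=
  let stack := s.toList.foldl solStep []
  if stack.length = 0 then 1 else 0

-- ===== PORT B =====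
-- scan for the first adjacent equal pair; return the list with that pair deleted
def removeFirstPair : List Char → Option (List Char)
  | a :: b :: t => if a = b then some (b :: t).tail else (removeFirstPair (b :: t)).map (a :: ·)
  | _ => none

theorem removeFirstPair_length : ∀ (l l' : List Char), removeFirstPair l = some l' → l'.length + 2 = l.length := by
  intro l
  induction l with
  | nil => intro l' h; simp [removeFirstPair] at h
  | cons a t ih =>
    intro l' h
    cases t with
    | nil => simp [removeFirstPair] at h
    | cons b u =>
      by_cases hab : a = b
      · simp [removeFirstPair, hab] at h; simp [← h]
      · simp [removeFirstPair, hab] at h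
        obtain ⟨m, hm, hl'⟩ := h
        have h2 := ih m hm
        subst hl'
        simp only [List.length_cons] at h2 ⊢
        omega

-- the while-loop: delete pairs until no adjacent equal pair remains
def reduceFix (l : List Char) : List Char :=
  match h : removeFirstPair l with
  | some l' => reduceFix l'
  | none => l
termination_by l.length
decreasing_by have := removeFirstPair_length l l' h; omega

def solution_alt (s : String) : Int :=
  if reduceFix s.toList = [] then 1 else 0

-- ===== PRECONDITION & SPEC =====
def Spec_solution (s : String) (out : Int) : Prop := out = solution_alt s
instance (s : String) (out : Int) : Decidable (Spec_solution s out) := by unfold Spec_solution; infer_instance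

-- ===== CLAIM (what is proved, stated in full; the proofs are below) =====
def Claim_equal_solution : Prop := ∀ (s : String), Dom_solution s → Spec_solution s (solution s)

-- ===== LEMMAS AND PROOFS =====

-- front-of-list version of A's step, used only in the proofs
def stepF (st : List Char) (c : Char) : List Char :=
  match st with
  | d :: t => if d = c then t else c :: d :: t
  | [] => [c]

theorem solStep_eq_stepF (st : List Char) (c : Char) :
    solStep st c = (stepF st.reverse c).reverse := by
  cases h : st.reverse with
  | nil =>
    have : st = [] := by simpa using congrArg List.reverse h
    subst this; simp [solStep, stepF]
  | cons d t =>
    have hst : st = t.reverse ++ [d] := by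
      have := congrArg List.reverse h; simpa using this
    subst hst
    by_cases hdc : d = c
    · simp [solStep, stepF, hdc]
    · simp [solStep, stepF, hdc, Ne.symm hdc]

theorem foldl_solStep_eq (l : List Char) : ∀ (st : List Char),
    l.foldl solStep st = (l.foldl stepF st.reverse).reverse := by
  induction l with
  | nil => simp
  | cons c t ih =>
    intro st
    simp only [List.foldl_cons, solStep_eq_stepF, ih, List.reverse_reverse]

theorem stepF_chain' {st : List Char} (h : List.IsChain (· ≠ ·) st) (c : Char) :
    List.IsChain (· ≠ ·) (stepF st c) := by
  cases st with
  | nil => simp [stepF]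
  | cons d t =>
    by_cases hdc : d = c
    · simpa [stepF, hdc] using h.tail
    · cases t with
      | nil => simp [stepF, hdc]; exact Ne.symm hdc
      | cons e u =>
        simp only [stepF, if_neg hdc]
        exact List.isChain_cons_cons.mpr ⟨Ne.symm hdc, h⟩

theorem stepF_stepF {st : List Char} (h : List.IsChain (· ≠ ·) st) (c : Char) :
    stepF (stepF st c) c = st := by
  cases st with
  | nil => simp [stepF]
  | cons d t =>
    by_cases hdc : d = c
    · subst hdc
      cases t with
      | nil => simp [stepF]
      | cons e u =>
        have hde : d ≠ e := (List.isChain_cons_cons.mp h).1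
        simp [stepF, Ne.symm hde]
    · simp [stepF, hdc]

theorem foldl_stepF_removeFirstPair : ∀ (l l' st : List Char),
    removeFirstPair l = some l' → List.IsChain (· ≠ ·) st →
    l.foldl stepF st = l'.foldl stepF st := by
  intro l
  induction l with
  | nil => intro l' st h; simp [removeFirstPair] at h
  | cons a t ih =>
    intro l' st h hst
    cases t with
    | nil => simp [removeFirstPair] at h
    | cons b u =>
      by_cases hab : a = b
      · simp [removeFirstPair, hab] at h
        subst h; subst hab
        simp [List.foldl_cons, stepF_stepF hst]
      · simp [removeFirstPair, hab] at h
        obtain ⟨m, hm, hl'⟩ := h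
        subst hl'
        simp only [List.foldl_cons]
        exact ih m (stepF st a) hm (stepF_chain' hst a)

theorem removeFirstPair_none : ∀ (l : List Char),
    removeFirstPair l = none → List.IsChain (· ≠ ·) l := by
  intro l
  induction l with
  | nil => intro _; simp
  | cons a t ih =>
    intro h
    cases t with
    | nil => simp
    | cons b u =>
      by_cases hab : a = b
      · simp [removeFirstPair, hab] at h
      · simp [removeFirstPair, hab] at h
        exact List.isChain_cons_cons.mpr ⟨hab, ih h⟩

theorem foldl_stepF_chain : ∀ (l st : List Char),
    List.IsChain (· ≠ ·) (l.reverse ++ st) →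
    l.foldl stepF st = l.reverse ++ st := by
  intro l
  induction l with
  | nil => simp
  | cons c t ih =>
    intro st h
    have h' : List.IsChain (· ≠ ·) (t.reverse ++ c :: st) := by
      simpa using h
    have hstep : stepF st c = c :: st := by
      cases st with
      | nil => simp [stepF]
      | cons d u =>
        have hcd : c ≠ d := by
          have h2 : List.IsChain (· ≠ ·) (t.reverse ++ c :: d :: u) := h'
          exact (List.isChain_append_cons_cons.mp h2).2.1
        simp [stepF, (Ne.symm hcd : d ≠ c)]
    simp only [List.foldl_cons, hstep]
    have := ih (c :: st) h'
    simpa using this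

theorem reduceFix_foldl : ∀ (l : List Char),
    l.foldl stepF [] = (reduceFix l).reverse := by
  intro l
  induction l using reduceFix.induct with
  | case1 l l' h ih =>
    rw [reduceFix, h]
    rw [foldl_stepF_removeFirstPair l l' [] h (by simp)]
    exact ih
  | case2 l h =>
    rw [reduceFix, h]
    have hch : List.IsChain (· ≠ ·) (l.reverse ++ ([] : List Char)) := by
      simpa using List.isChain_reverse.mpr (by simpa [Ne, eq_comm] using removeFirstPair_none l h)
    have := foldl_stepF_chain l [] hch
    simpa using this

-- ===== VERDICT (by name: the statement is the Claim_ definition above) =====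
theorem solution_spec : Claim_equal_solution := by
  intro s _
  unfold Spec_solution solution solution_alt
  rw [foldl_solStep_eq]
  simp only [List.reverse_nil, reduceFix_foldl, List.reverse_reverse, List.length_reverse]
  by_cases h : reduceFix s.toList = []
  · simp [h]
  · simp [h, List.length_eq_zero_iff]
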